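-- pv_equiv track=rewrite | github.com/gitvelen/velentrade | src/velentrade/domain/investment/analysis/memo.py | _majority_sign
-- ===== SOURCE A (Python) =====
-- def _sign(score: int) -> int:
--     if score > 0:
--         return 1
--     if score < 0:
--         return -1
--     return 0
--
-- def _majority_sign(scores: list[int]) -> int:
--     signs = [_sign(score) for score in scores if _sign(score) != 0]
--     if not signs:
--         return 0
--     positive = signs.count(1)
--     negative = signs.count(-1)
--     if positive == negative:
--         return 0
--     return 1 if positive > negative else -1
-- ===== SOURCE B (Python) =====
-- def _sign(score: int) -> int:
--     if score > 0:
--         return 1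
--     if score < 0:
--         return -1
--     return 0
--
-- def _majority_sign(scores: list[int]) -> int:
--     balance = 0
--     for score in scores:
--         balance += _sign(score)
--     return _sign(balance)
-- ===== Notes on version B (the rewrite author's own statement) =====
-- stated objective: simpler
-- what changed: Replaces the filtered sign list plus two .count passes and a three-way comparison with a single-pass integer sign-balance accumulator whose sign is returned.
import Mathlib
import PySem

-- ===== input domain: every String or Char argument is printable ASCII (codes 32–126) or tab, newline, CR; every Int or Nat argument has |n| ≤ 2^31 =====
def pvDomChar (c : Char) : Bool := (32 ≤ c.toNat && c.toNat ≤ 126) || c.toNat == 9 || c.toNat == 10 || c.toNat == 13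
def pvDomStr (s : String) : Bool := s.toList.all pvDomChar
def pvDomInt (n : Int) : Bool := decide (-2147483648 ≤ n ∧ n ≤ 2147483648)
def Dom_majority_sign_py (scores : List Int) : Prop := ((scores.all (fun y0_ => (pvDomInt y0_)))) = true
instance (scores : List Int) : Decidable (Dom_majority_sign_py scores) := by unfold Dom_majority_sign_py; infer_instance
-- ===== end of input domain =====

-- B rewrites the filtered list + two .count passes as a single-pass sign balance; same values everywhere.

-- ===== PORT A =====
-- shared same-module helper _sign (used verbatim by both Pythons)
def sign_py (score : Int) : Int :=
  if score > 0 then 1 else if score < 0 then -1 else 0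

def majority_sign_py (scores : List Int) : Int :=
  -- signs = [_sign(score) for score in scores if _sign(score) != 0]
  let signs := (scores.filter (fun score => sign_py score ≠ 0)).map sign_py
  if signs.isEmpty then 0
  else
    let positive := signs.count 1
    let negative := signs.count (-1)
    if positive = negative then 0
    else if positive > negative then 1 else -1

-- ===== PORT B =====
def majority_sign_py_alt (scores : List Int) : Int :=
  sign_py (scores.foldl (fun balance score => balance + sign_py score) 0)

-- ===== PRECONDITION & SPEC =====
def Spec_majority_sign_py (scores : List Int) (out : Int) : Prop := out = majority_sign_py_alt scores
instance (scores : List Int) (out : Int) : Decidable (Spec_majority_sign_py scores out) := by unfold Spec_majority_sign_py; infer_instance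

-- ===== CLAIM (what is proved, stated in full; the proofs are below) =====
def Claim_equal_majority_sign_py : Prop := ∀ (scores : List Int), Dom_majority_sign_py scores → Spec_majority_sign_py scores (majority_sign_py scores)

-- ===== LEMMAS AND PROOFS =====

-- the running balance equals (#positives) − (#negatives) of the filtered sign list
theorem balance_eq_counts (l : List Int) (a : Int) :
    l.foldl (fun balance score => balance + sign_py score) a
      = a + ((((l.filter (fun score => sign_py score ≠ 0)).map sign_py).count 1 : Int)
           - (((l.filter (fun score => sign_py score ≠ 0)).map sign_py).count (-1) : Int)) := by
  induction l generalizing a with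
  | nil => simp
  | cons x t ih =>
    rw [List.foldl_cons, ih]
    rcases lt_trichotomy x 0 with hn | hz | hp
    · have hs : sign_py x = -1 := by simp [sign_py, hn, not_lt.mpr hn.le]
      simp [hs]
      ring
    · have hs : sign_py x = 0 := by simp [sign_py, hz]
      simp [hs]
    · have hs : sign_py x = 1 := by simp [sign_py, hp]
      simp [hs]
      ring

-- ===== VERDICT (by name: the statement is the Claim_ definition above) =====
theorem majority_sign_py_spec : Claim_equal_majority_sign_py := by
  intro scores _
  unfold Spec_majority_sign_py majority_sign_py majority_sign_py_alt
  rw [balance_eq_counts]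
  set signs := (scores.filter (fun score => sign_py score ≠ 0)).map sign_py with hs
  by_cases he : signs.isEmpty
  · have h0 : signs = [] := List.isEmpty_iff.mp he
    simp [h0, sign_py]
  · simp only [he, Bool.false_eq_true, if_false, sign_py, zero_add]
    split_ifs <;> omega
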